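-- pv_equiv track=rewrite | github.com/Praneet2126/myCommunity | ai-service/test_time_functions.py | get_time_slot_priority
-- ===== SOURCE A (Python) =====
-- def get_time_slot_priority(place: dict) -> tuple:
--     """
--     Categorize activity by time slot and return (priority, earliest_start_minutes, latest_end_minutes)
--     Priority: 0=morning, 1=afternoon, 2=late_afternoon, 3=evening, 4=night
--     """
--     best_time = place.get("best_time", "").lower()
--     category = place.get("category", "").lower()
--     name = place.get("name", "").lower()
--
--     # Night activities (9 PM - 3 AM) - Priority 4
--     if any(keyword in category for keyword in ["casino", "nightlife"]) or \
--        any(keyword in name for keyword in ["club", "casino", "party", "tito", "lpk"]) or \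
--        "night" in best_time or \
--        ("09:00 pm" in best_time or "10:00 pm" in best_time or "11:00 pm" in best_time):
--         return (4, 21 * 60, 27 * 60)  # 9 PM - 3 AM
--
--     # Morning activities (6 AM - 11 AM) - Priority 0
--     if any(keyword in category for keyword in ["trek", "wildlife", "nature"]) or \
--        "morning" in best_time or \
--        ("06:00 am" in best_time or "07:00 am" in best_time or "08:00 am" in best_time) or \
--        any(keyword in name for keyword in ["trek", "wildlife", "bird", "yoga"]):
--         return (0, 6 * 60, 11 * 60)  # 6 AM - 11 AM
--
--     # Beach activities (must end before 6 PM) - Priority 2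
--     if "beach" in category or "beach" in name or "sunset" in best_time:
--         return (2, 16 * 60, 18 * 60)  # 4 PM - 6 PM (sunset time)
--
--     # Water sports (10 AM - 5 PM) - Priority 1
--     if "water sports" in category or any(keyword in name for keyword in ["scuba", "parasailing", "kayaking", "jet ski", "surfing"]):
--         return (1, 10 * 60, 17 * 60)  # 10 AM - 5 PM
--
--     # Evening activities (6 PM - 9 PM) - Priority 3
--     if "restaurant" in category or "dining" in category or \
--        any(keyword in name.lower() for keyword in ["restaurant", "dining", "cruise", "cultural show"]) or \
--        ("06:00 pm" in best_time or "07:00 pm" in best_time or "08:00 pm" in best_time):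
--         return (3, 18 * 60, 21 * 60)  # 6 PM - 9 PM
--
--     # Default to afternoon (11 AM - 4 PM) - Priority 1
--     return (1, 11 * 60, 16 * 60)  # 11 AM - 4 PM
-- ===== SOURCE B (Python) =====
-- # Multi-pattern substring matcher: enumerate every window of length <= 13,
-- # look it up in a keyword table, keep the lowest-rank hit; rank picks the slot.
--
-- _T0 = (4, 21 * 60, 27 * 60)   # night
-- _T1 = (0, 6 * 60, 11 * 60)    # morning
-- _T2 = (2, 16 * 60, 18 * 60)   # beach / sunset
-- _T3 = (1, 10 * 60, 17 * 60)   # water sports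
-- _T4 = (3, 18 * 60, 21 * 60)   # evening
-- _DEFAULT = (5, (1, 11 * 60, 16 * 60))
--
-- _TABLES = [
--     ("best_time", {
--         "night": (0, _T0), "09:00 pm": (0, _T0), "10:00 pm": (0, _T0), "11:00 pm": (0, _T0),
--         "morning": (1, _T1), "06:00 am": (1, _T1), "07:00 am": (1, _T1), "08:00 am": (1, _T1),
--         "sunset": (2, _T2),
--         "06:00 pm": (4, _T4), "07:00 pm": (4, _T4), "08:00 pm": (4, _T4),
--     }),
--     ("category", {
--         "casino": (0, _T0), "nightlife": (0, _T0),
--         "trek": (1, _T1), "wildlife": (1, _T1), "nature": (1, _T1),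
--         "beach": (2, _T2),
--         "water sports": (3, _T3),
--         "restaurant": (4, _T4), "dining": (4, _T4),
--     }),
--     ("name", {
--         "club": (0, _T0), "casino": (0, _T0), "party": (0, _T0), "tito": (0, _T0), "lpk": (0, _T0),
--         "trek": (1, _T1), "wildlife": (1, _T1), "bird": (1, _T1), "yoga": (1, _T1),
--         "beach": (2, _T2),
--         "scuba": (3, _T3), "parasailing": (3, _T3), "kayaking": (3, _T3), "jet ski": (3, _T3), "surfing": (3, _T3),
--         "restaurant": (4, _T4), "dining": (4, _T4), "cruise": (4, _T4), "cultural show": (4, _T4),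
--     }),
-- ]
-- _MAXLEN = 13  # longest keyword ("cultural show")
--
--
-- def get_time_slot_priority(place: dict) -> tuple:
--     best = _DEFAULT
--     for field, table in _TABLES:
--         text = place.get(field, "").lower()
--         n = len(text)
--         for i in range(n):
--             for j in range(i + 1, min(i + _MAXLEN, n) + 1):
--                 hit = table.get(text[i:j])
--                 if hit is not None and hit[0] < best[0]:
--                     best = hit
--     return best[1]
-- ===== Notes on version B (the rewrite author's own statement) =====
-- stated objective: alternative
-- what changed: Replaced the cascade of substring ('in') tests with a multi-pattern matcher: B slides a window of length <= 13 over each field, looks every window up in a keyword->(rank, slot) hash table, and returns the slot of the minimum-rank hit (default rank 5), so no 'in' test and no ordered rule cascade remains.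
import Mathlib
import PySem

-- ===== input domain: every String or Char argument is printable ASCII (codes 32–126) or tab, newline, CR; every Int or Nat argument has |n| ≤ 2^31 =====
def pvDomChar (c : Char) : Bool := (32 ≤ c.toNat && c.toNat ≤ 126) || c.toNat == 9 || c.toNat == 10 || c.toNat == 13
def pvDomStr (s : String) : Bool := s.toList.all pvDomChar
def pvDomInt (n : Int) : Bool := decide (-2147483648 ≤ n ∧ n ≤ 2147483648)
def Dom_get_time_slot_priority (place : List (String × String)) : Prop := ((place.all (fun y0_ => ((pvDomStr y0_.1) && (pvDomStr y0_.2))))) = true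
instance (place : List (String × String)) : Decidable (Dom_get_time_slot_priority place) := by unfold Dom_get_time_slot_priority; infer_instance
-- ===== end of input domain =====

-- B replaces A's cascade of substring tests by a multi-pattern matcher: it slides a window of
-- length ≤ 13 over each field, looks each window up in a keyword→(rank, slot) table and keeps
-- the minimum-rank hit (alternative algorithm, same observable behaviour).

-- ===== PORT A =====
-- place.get(k, "") on the association list: first match, default ""
def pvGet (place : List (String × String)) (k : String) : String :=
  match place.find? (fun p => p.1 == k) with
  | some p => p.2
  | none => ""

def get_time_slot_priority (place : List (String × String)) : Int × Int × Int :=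
  let best_time := PySem.Str.lower (pvGet place "best_time")
  let category := PySem.Str.lower (pvGet place "category")
  let name := PySem.Str.lower (pvGet place "name")
  if (["casino", "nightlife"].any (fun keyword => PySem.Str.isIn keyword category)) ||
     (["club", "casino", "party", "tito", "lpk"].any (fun keyword => PySem.Str.isIn keyword name)) ||
     PySem.Str.isIn "night" best_time ||
     (PySem.Str.isIn "09:00 pm" best_time || PySem.Str.isIn "10:00 pm" best_time || PySem.Str.isIn "11:00 pm" best_time) then
    (4, 21 * 60, 27 * 60)
  else if (["trek", "wildlife", "nature"].any (fun keyword => PySem.Str.isIn keyword category)) ||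
     PySem.Str.isIn "morning" best_time ||
     (PySem.Str.isIn "06:00 am" best_time || PySem.Str.isIn "07:00 am" best_time || PySem.Str.isIn "08:00 am" best_time) ||
     (["trek", "wildlife", "bird", "yoga"].any (fun keyword => PySem.Str.isIn keyword name)) then
    (0, 6 * 60, 11 * 60)
  else if PySem.Str.isIn "beach" category || PySem.Str.isIn "beach" name || PySem.Str.isIn "sunset" best_time then
    (2, 16 * 60, 18 * 60)
  else if PySem.Str.isIn "water sports" category ||
     (["scuba", "parasailing", "kayaking", "jet ski", "surfing"].any (fun keyword => PySem.Str.isIn keyword name)) then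
    (1, 10 * 60, 17 * 60)
  else if PySem.Str.isIn "restaurant" category || PySem.Str.isIn "dining" category ||
     (["restaurant", "dining", "cruise", "cultural show"].any (fun keyword => PySem.Str.isIn keyword (PySem.Str.lower name))) ||
     (PySem.Str.isIn "06:00 pm" best_time || PySem.Str.isIn "07:00 pm" best_time || PySem.Str.isIn "08:00 pm" best_time) then
    (3, 18 * 60, 21 * 60)
  else
    (1, 11 * 60, 16 * 60)

-- ===== PORT B =====
-- the six (rank, slot) values of Source B; rank 5 with the afternoon slot is the default
def pvV0 : Int × (Int × Int × Int) := (0, (4, 1260, 1620))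
def pvV1 : Int × (Int × Int × Int) := (1, (0, 360, 660))
def pvV2 : Int × (Int × Int × Int) := (2, (2, 960, 1080))
def pvV3 : Int × (Int × Int × Int) := (3, (1, 600, 1020))
def pvV4 : Int × (Int × Int × Int) := (4, (3, 1080, 1260))
def pvDef : Int × (Int × Int × Int) := (5, (1, 660, 960))

def pvTblBT : PySem.Dict String (Int × (Int × Int × Int)) := PySem.Dict.mk
  [("night", pvV0), ("09:00 pm", pvV0), ("10:00 pm", pvV0), ("11:00 pm", pvV0),
   ("morning", pvV1), ("06:00 am", pvV1), ("07:00 am", pvV1), ("08:00 am", pvV1),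
   ("sunset", pvV2),
   ("06:00 pm", pvV4), ("07:00 pm", pvV4), ("08:00 pm", pvV4)]

def pvTblCAT : PySem.Dict String (Int × (Int × Int × Int)) := PySem.Dict.mk
  [("casino", pvV0), ("nightlife", pvV0),
   ("trek", pvV1), ("wildlife", pvV1), ("nature", pvV1),
   ("beach", pvV2),
   ("water sports", pvV3),
   ("restaurant", pvV4), ("dining", pvV4)]

def pvTblNM : PySem.Dict String (Int × (Int × Int × Int)) := PySem.Dict.mk
  [("club", pvV0), ("casino", pvV0), ("party", pvV0), ("tito", pvV0), ("lpk", pvV0),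
   ("trek", pvV1), ("wildlife", pvV1), ("bird", pvV1), ("yoga", pvV1),
   ("beach", pvV2),
   ("scuba", pvV3), ("parasailing", pvV3), ("kayaking", pvV3), ("jet ski", pvV3), ("surfing", pvV3),
   ("restaurant", pvV4), ("dining", pvV4), ("cruise", pvV4), ("cultural show", pvV4)]

def pvTables : List (String × PySem.Dict String (Int × (Int × Int × Int))) :=
  [("best_time", pvTblBT), ("category", pvTblCAT), ("name", pvTblNM)]

-- the body of Source B's innermost loop: text[i:j] with j = i+1+d is (text.drop i).take (d+1)
def pvInnerStep (table : PySem.Dict String (Int × (Int × Int × Int))) (text : List Char) (i : Nat)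
    (b' : Int × (Int × Int × Int)) (d : Nat) : Int × (Int × Int × Int) :=
  match table.get? (String.ofList ((text.drop i).take (d + 1))) with
  | some hit => if hit.1 < b'.1 then hit else b'
  | none => b'

-- the two nested index loops of Source B over one field's text
def pvScanText (table : PySem.Dict String (Int × (Int × Int × Int))) (text : List Char)
    (best : Int × (Int × Int × Int)) : Int × (Int × Int × Int) :=
  (List.range text.length).foldl (fun b i =>
    (List.range (min (i + 13) text.length + 1 - (i + 1))).foldl (pvInnerStep table text i) b) best

def get_time_slot_priority_alt (place : List (String × String)) : Int × Int × Int :=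
  (pvTables.foldl
    (fun best ft => pvScanText ft.2 (PySem.Chars.lower (pvGet place ft.1).toList) best)
    pvDef).2

-- ===== PRECONDITION & SPEC =====
def Spec_get_time_slot_priority (place : List (String × String)) (out : Int × Int × Int) : Prop := out = get_time_slot_priority_alt place
instance (place : List (String × String)) (out : Int × Int × Int) : Decidable (Spec_get_time_slot_priority place out) := by unfold Spec_get_time_slot_priority; infer_instance

-- ===== CLAIM (what is proved, stated in full; the proofs are below) =====
def Claim_equal_get_time_slot_priority : Prop := ∀ (place : List (String × String)), Dom_get_time_slot_priority place → Spec_get_time_slot_priority place (get_time_slot_priority place)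

-- ===== LEMMAS AND PROOFS =====

-- "some keyword of the table occurs in the text, with table value v"
def pvMatched (table : PySem.Dict String (Int × (Int × Int × Int))) (text : List Char)
    (v : Int × (Int × Int × Int)) : Prop :=
  ∃ kw : String, table.get? kw = some v ∧ PySem.Chars.isIn kw.toList text = true

-- per-field keyword groups (exactly the keywords A tests, per rank)
def pvB0 (t : List Char) : Prop :=
  PySem.Chars.isIn ['n', 'i', 'g', 'h', 't'] t = true ∨
  PySem.Chars.isIn ['0', '9', ':', '0', '0', ' ', 'p', 'm'] t = true ∨
  PySem.Chars.isIn ['1', '0', ':', '0', '0', ' ', 'p', 'm'] t = true ∨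
  PySem.Chars.isIn ['1', '1', ':', '0', '0', ' ', 'p', 'm'] t = true
def pvB1 (t : List Char) : Prop :=
  PySem.Chars.isIn ['m', 'o', 'r', 'n', 'i', 'n', 'g'] t = true ∨
  PySem.Chars.isIn ['0', '6', ':', '0', '0', ' ', 'a', 'm'] t = true ∨
  PySem.Chars.isIn ['0', '7', ':', '0', '0', ' ', 'a', 'm'] t = true ∨
  PySem.Chars.isIn ['0', '8', ':', '0', '0', ' ', 'a', 'm'] t = true
def pvB2 (t : List Char) : Prop :=
  PySem.Chars.isIn ['s', 'u', 'n', 's', 'e', 't'] t = true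
def pvB4 (t : List Char) : Prop :=
  PySem.Chars.isIn ['0', '6', ':', '0', '0', ' ', 'p', 'm'] t = true ∨
  PySem.Chars.isIn ['0', '7', ':', '0', '0', ' ', 'p', 'm'] t = true ∨
  PySem.Chars.isIn ['0', '8', ':', '0', '0', ' ', 'p', 'm'] t = true
def pvC0 (t : List Char) : Prop :=
  PySem.Chars.isIn ['c', 'a', 's', 'i', 'n', 'o'] t = true ∨
  PySem.Chars.isIn ['n', 'i', 'g', 'h', 't', 'l', 'i', 'f', 'e'] t = true
def pvC1 (t : List Char) : Prop :=
  PySem.Chars.isIn ['t', 'r', 'e', 'k'] t = true ∨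
  PySem.Chars.isIn ['w', 'i', 'l', 'd', 'l', 'i', 'f', 'e'] t = true ∨
  PySem.Chars.isIn ['n', 'a', 't', 'u', 'r', 'e'] t = true
def pvC2 (t : List Char) : Prop :=
  PySem.Chars.isIn ['b', 'e', 'a', 'c', 'h'] t = true
def pvC3 (t : List Char) : Prop :=
  PySem.Chars.isIn ['w', 'a', 't', 'e', 'r', ' ', 's', 'p', 'o', 'r', 't', 's'] t = true
def pvC4 (t : List Char) : Prop :=
  PySem.Chars.isIn ['r', 'e', 's', 't', 'a', 'u', 'r', 'a', 'n', 't'] t = true ∨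
  PySem.Chars.isIn ['d', 'i', 'n', 'i', 'n', 'g'] t = true
def pvN0 (t : List Char) : Prop :=
  PySem.Chars.isIn ['c', 'l', 'u', 'b'] t = true ∨
  PySem.Chars.isIn ['c', 'a', 's', 'i', 'n', 'o'] t = true ∨
  PySem.Chars.isIn ['p', 'a', 'r', 't', 'y'] t = true ∨
  PySem.Chars.isIn ['t', 'i', 't', 'o'] t = true ∨
  PySem.Chars.isIn ['l', 'p', 'k'] t = true
def pvN1 (t : List Char) : Prop :=
  PySem.Chars.isIn ['t', 'r', 'e', 'k'] t = true ∨
  PySem.Chars.isIn ['w', 'i', 'l', 'd', 'l', 'i', 'f', 'e'] t = true ∨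
  PySem.Chars.isIn ['b', 'i', 'r', 'd'] t = true ∨
  PySem.Chars.isIn ['y', 'o', 'g', 'a'] t = true
def pvN2 (t : List Char) : Prop :=
  PySem.Chars.isIn ['b', 'e', 'a', 'c', 'h'] t = true
def pvN3 (t : List Char) : Prop :=
  PySem.Chars.isIn ['s', 'c', 'u', 'b', 'a'] t = true ∨
  PySem.Chars.isIn ['p', 'a', 'r', 'a', 's', 'a', 'i', 'l', 'i', 'n', 'g'] t = true ∨
  PySem.Chars.isIn ['k', 'a', 'y', 'a', 'k', 'i', 'n', 'g'] t = true ∨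
  PySem.Chars.isIn ['j', 'e', 't', ' ', 's', 'k', 'i'] t = true ∨
  PySem.Chars.isIn ['s', 'u', 'r', 'f', 'i', 'n', 'g'] t = true
def pvN4 (t : List Char) : Prop :=
  PySem.Chars.isIn ['r', 'e', 's', 't', 'a', 'u', 'r', 'a', 'n', 't'] t = true ∨
  PySem.Chars.isIn ['d', 'i', 'n', 'i', 'n', 'g'] t = true ∨
  PySem.Chars.isIn ['c', 'r', 'u', 'i', 's', 'e'] t = true ∨
  PySem.Chars.isIn ['c', 'u', 'l', 't', 'u', 'r', 'a', 'l', ' ', 's', 'h', 'o', 'w'] t = true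

-- the five rank conditions, grouped per table (logically A's five cascade conditions)
def pvP0 (bt cat nm : List Char) : Prop := pvC0 cat ∨ pvN0 nm ∨ pvB0 bt
def pvP1 (bt cat nm : List Char) : Prop := pvC1 cat ∨ pvB1 bt ∨ pvN1 nm
def pvP2 (bt cat nm : List Char) : Prop := pvC2 cat ∨ pvN2 nm ∨ pvB2 bt
def pvP3 (bt cat nm : List Char) : Prop := pvC3 cat ∨ pvN3 nm
def pvP4 (bt cat nm : List Char) : Prop := pvC4 cat ∨ pvN4 nm ∨ pvB4 bt

-- generic facts about left folds that only ever lower the first component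
theorem pv_foldl_fst_le {α : Type} (step : (Int × (Int × Int × Int)) → α → (Int × (Int × Int × Int)))
    (hm : ∀ b x, (step b x).1 ≤ b.1) :
    ∀ (l : List α) (b : Int × (Int × Int × Int)), (l.foldl step b).1 ≤ b.1 := by
  intro l
  induction l with
  | nil => intro b; simp
  | cons x l ih => intro b; exact le_trans (ih (step b x)) (hm b x)

theorem pv_foldl_le_of_mem {α : Type} (step : (Int × (Int × Int × Int)) → α → (Int × (Int × Int × Int)))
    (hm : ∀ b x, (step b x).1 ≤ b.1) {x : α} {r : Int}
    (hx : ∀ b, (step b x).1 ≤ r) :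
    ∀ (l : List α) (b : Int × (Int × Int × Int)), x ∈ l → (l.foldl step b).1 ≤ r := by
  intro l
  induction l with
  | nil => intro b h; simp at h
  | cons y l ih =>
    intro b h
    rcases List.mem_cons.mp h with h | h
    · subst h
      exact le_trans (pv_foldl_fst_le step hm l (step b x)) (hx b)
    · exact ih (step b y) h

theorem pv_foldl_eq_or {α : Type} (step : (Int × (Int × Int × Int)) → α → (Int × (Int × Int × Int)))
    (Q : (Int × (Int × Int × Int)) → Prop)
    (hq : ∀ b x, step b x = b ∨ Q (step b x)) :
    ∀ (l : List α) (b : Int × (Int × Int × Int)), l.foldl step b = b ∨ Q (l.foldl step b) := by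
  intro l
  induction l with
  | nil => intro b; simp
  | cons x l ih =>
    intro b
    rcases ih (step b x) with h | h
    · rw [List.foldl_cons, h]; exact (hq b x).imp id id
    · exact Or.inr (by rwa [List.foldl_cons])

theorem pv_inner_step_le (table : PySem.Dict String (Int × (Int × Int × Int))) (text : List Char) (i : Nat) :
    ∀ (b : Int × (Int × Int × Int)) (d : Nat), (pvInnerStep table text i b d).1 ≤ b.1 := by
  intro b d
  unfold pvInnerStep
  cases h : table.get? (String.ofList ((text.drop i).take (d + 1))) with
  | none => simp
  | some hit => simp only; split <;> omega

theorem pv_scan_fst_le (table : PySem.Dict String (Int × (Int × Int × Int))) (text : List Char)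
    (b : Int × (Int × Int × Int)) : (pvScanText table text b).1 ≤ b.1 := by
  unfold pvScanText
  exact pv_foldl_fst_le _ (fun b i => pv_foldl_fst_le _ (pv_inner_step_le table text i) _ b) _ b

theorem pv_scan_eq_or (table : PySem.Dict String (Int × (Int × Int × Int))) (text : List Char)
    (b : Int × (Int × Int × Int)) :
    pvScanText table text b = b ∨ pvMatched table text (pvScanText table text b) := by
  unfold pvScanText
  apply pv_foldl_eq_or
  intro b i
  apply pv_foldl_eq_or
  intro b' d
  unfold pvInnerStep
  cases h : table.get? (String.ofList ((text.drop i).take (d + 1))) with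
  | none => exact Or.inl rfl
  | some hit =>
    simp only
    split
    · refine Or.inr ⟨String.ofList ((text.drop i).take (d + 1)), h, ?_⟩
      refine (PySem.Chars.isIn_iff_infix _ _).mpr ?_
      rw [String.toList_ofList]
      exact (List.take_prefix _ _).isInfix.trans (List.drop_suffix i text).isInfix
    · exact Or.inl rfl

-- if a table keyword (nonempty, length ≤ 13) occurs in the text, the scan ends at rank ≤ its rank
theorem pv_scan_le_of_matched (table : PySem.Dict String (Int × (Int × Int × Int))) (text : List Char)
    (hkeys : ∀ (kw : String) (v' : Int × (Int × Int × Int)),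
      table.get? kw = some v' → 1 ≤ kw.toList.length ∧ kw.toList.length ≤ 13)
    {v : Int × (Int × Int × Int)} (h : pvMatched table text v)
    (b : Int × (Int × Int × Int)) : (pvScanText table text b).1 ≤ v.1 := by
  obtain ⟨kw, hget, hin⟩ := h
  obtain ⟨hlen1, hlen13⟩ := hkeys kw v hget
  obtain ⟨i, hpre⟩ := (PySem.Chars.exists_prefix_drop_iff_isIn kw.toList text).mpr hin
  have hlen_le : kw.toList.length ≤ (text.drop i).length := hpre.length_le
  have hi : i < text.length := by
    simp only [List.length_drop] at hlen_le; omega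
  have htake : (text.drop i).take kw.toList.length = kw.toList :=
    (List.prefix_iff_eq_take.mp hpre).symm
  unfold pvScanText
  refine pv_foldl_le_of_mem _
    (fun b i => pv_foldl_fst_le _ (pv_inner_step_le table text i) _ b)
    (x := i) ?_ _ b (List.mem_range.mpr hi)
  intro b0
  refine pv_foldl_le_of_mem _ (pv_inner_step_le table text i) (x := kw.toList.length - 1) ?_ _ b0 ?_
  · intro b1
    have hsub : (text.drop i).take (kw.toList.length - 1 + 1) = kw.toList := by
      have : kw.toList.length - 1 + 1 = kw.toList.length := by omega
      rw [this, htake]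
    unfold pvInnerStep
    simp only [hsub, String.ofList_toList, hget]
    split <;> omega
  · refine List.mem_range.mpr ?_
    simp only [List.length_drop] at hlen_le
    omega

-- every key of each table is nonempty and at most 13 characters long
theorem pv_keys_BT : ∀ (kw : String) (v : Int × (Int × Int × Int)),
    pvTblBT.get? kw = some v → 1 ≤ kw.toList.length ∧ kw.toList.length ≤ 13 := by
  intro kw v h
  have hm := PySem.Dict.mem_items_of_get?_eq_some pvTblBT h
  simp only [pvTblBT, List.mem_cons, List.not_mem_nil, or_false, Prod.mk.injEq] at hm
  rcases hm with ⟨rfl,-⟩|⟨rfl,-⟩|⟨rfl,-⟩|⟨rfl,-⟩|⟨rfl,-⟩|⟨rfl,-⟩|⟨rfl,-⟩|⟨rfl,-⟩|⟨rfl,-⟩|⟨rfl,-⟩|⟨rfl,-⟩|⟨rfl,-⟩ <;> simp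

theorem pv_keys_CAT : ∀ (kw : String) (v : Int × (Int × Int × Int)),
    pvTblCAT.get? kw = some v → 1 ≤ kw.toList.length ∧ kw.toList.length ≤ 13 := by
  intro kw v h
  have hm := PySem.Dict.mem_items_of_get?_eq_some pvTblCAT h
  simp only [pvTblCAT, List.mem_cons, List.not_mem_nil, or_false, Prod.mk.injEq] at hm
  rcases hm with ⟨rfl,-⟩|⟨rfl,-⟩|⟨rfl,-⟩|⟨rfl,-⟩|⟨rfl,-⟩|⟨rfl,-⟩|⟨rfl,-⟩|⟨rfl,-⟩|⟨rfl,-⟩ <;> simp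

theorem pv_keys_NM : ∀ (kw : String) (v : Int × (Int × Int × Int)),
    pvTblNM.get? kw = some v → 1 ≤ kw.toList.length ∧ kw.toList.length ≤ 13 := by
  intro kw v h
  have hm := PySem.Dict.mem_items_of_get?_eq_some pvTblNM h
  simp only [pvTblNM, List.mem_cons, List.not_mem_nil, or_false, Prod.mk.injEq] at hm
  rcases hm with ⟨rfl,-⟩|⟨rfl,-⟩|⟨rfl,-⟩|⟨rfl,-⟩|⟨rfl,-⟩|⟨rfl,-⟩|⟨rfl,-⟩|⟨rfl,-⟩|⟨rfl,-⟩|⟨rfl,-⟩|⟨rfl,-⟩|⟨rfl,-⟩|⟨rfl,-⟩|⟨rfl,-⟩|⟨rfl,-⟩|⟨rfl,-⟩|⟨rfl,-⟩|⟨rfl,-⟩|⟨rfl,-⟩ <;> simp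

theorem pv_nodup_BT : pvTblBT.keys.Nodup := by simp [pvTblBT]
theorem pv_nodup_CAT : pvTblCAT.keys.Nodup := by simp [pvTblCAT]
theorem pv_nodup_NM : pvTblNM.keys.Nodup := by simp [pvTblNM]

-- string literals as character lists
theorem pv_tl_0600_am : "06:00 am".toList = ['0', '6', ':', '0', '0', ' ', 'a', 'm'] := by simp
theorem pv_tl_0600_pm : "06:00 pm".toList = ['0', '6', ':', '0', '0', ' ', 'p', 'm'] := by simp
theorem pv_tl_0700_am : "07:00 am".toList = ['0', '7', ':', '0', '0', ' ', 'a', 'm'] := by simp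
theorem pv_tl_0700_pm : "07:00 pm".toList = ['0', '7', ':', '0', '0', ' ', 'p', 'm'] := by simp
theorem pv_tl_0800_am : "08:00 am".toList = ['0', '8', ':', '0', '0', ' ', 'a', 'm'] := by simp
theorem pv_tl_0800_pm : "08:00 pm".toList = ['0', '8', ':', '0', '0', ' ', 'p', 'm'] := by simp
theorem pv_tl_0900_pm : "09:00 pm".toList = ['0', '9', ':', '0', '0', ' ', 'p', 'm'] := by simp
theorem pv_tl_1000_pm : "10:00 pm".toList = ['1', '0', ':', '0', '0', ' ', 'p', 'm'] := by simp
theorem pv_tl_1100_pm : "11:00 pm".toList = ['1', '1', ':', '0', '0', ' ', 'p', 'm'] := by simp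
theorem pv_tl_beach : "beach".toList = ['b', 'e', 'a', 'c', 'h'] := by simp
theorem pv_tl_bird : "bird".toList = ['b', 'i', 'r', 'd'] := by simp
theorem pv_tl_casino : "casino".toList = ['c', 'a', 's', 'i', 'n', 'o'] := by simp
theorem pv_tl_club : "club".toList = ['c', 'l', 'u', 'b'] := by simp
theorem pv_tl_cruise : "cruise".toList = ['c', 'r', 'u', 'i', 's', 'e'] := by simp
theorem pv_tl_cultural_show : "cultural show".toList = ['c', 'u', 'l', 't', 'u', 'r', 'a', 'l', ' ', 's', 'h', 'o', 'w'] := by simp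
theorem pv_tl_dining : "dining".toList = ['d', 'i', 'n', 'i', 'n', 'g'] := by simp
theorem pv_tl_jet_ski : "jet ski".toList = ['j', 'e', 't', ' ', 's', 'k', 'i'] := by simp
theorem pv_tl_kayaking : "kayaking".toList = ['k', 'a', 'y', 'a', 'k', 'i', 'n', 'g'] := by simp
theorem pv_tl_lpk : "lpk".toList = ['l', 'p', 'k'] := by simp
theorem pv_tl_morning : "morning".toList = ['m', 'o', 'r', 'n', 'i', 'n', 'g'] := by simp
theorem pv_tl_nature : "nature".toList = ['n', 'a', 't', 'u', 'r', 'e'] := by simp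
theorem pv_tl_night : "night".toList = ['n', 'i', 'g', 'h', 't'] := by simp
theorem pv_tl_nightlife : "nightlife".toList = ['n', 'i', 'g', 'h', 't', 'l', 'i', 'f', 'e'] := by simp
theorem pv_tl_parasailing : "parasailing".toList = ['p', 'a', 'r', 'a', 's', 'a', 'i', 'l', 'i', 'n', 'g'] := by simp
theorem pv_tl_party : "party".toList = ['p', 'a', 'r', 't', 'y'] := by simp
theorem pv_tl_restaurant : "restaurant".toList = ['r', 'e', 's', 't', 'a', 'u', 'r', 'a', 'n', 't'] := by simp
theorem pv_tl_scuba : "scuba".toList = ['s', 'c', 'u', 'b', 'a'] := by simp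
theorem pv_tl_sunset : "sunset".toList = ['s', 'u', 'n', 's', 'e', 't'] := by simp
theorem pv_tl_surfing : "surfing".toList = ['s', 'u', 'r', 'f', 'i', 'n', 'g'] := by simp
theorem pv_tl_tito : "tito".toList = ['t', 'i', 't', 'o'] := by simp
theorem pv_tl_trek : "trek".toList = ['t', 'r', 'e', 'k'] := by simp
theorem pv_tl_water_sports : "water sports".toList = ['w', 'a', 't', 'e', 'r', ' ', 's', 'p', 'o', 'r', 't', 's'] := by simp
theorem pv_tl_wildlife : "wildlife".toList = ['w', 'i', 'l', 'd', 'l', 'i', 'f', 'e'] := by simp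
theorem pv_tl_yoga : "yoga".toList = ['y', 'o', 'g', 'a'] := by simp

-- lookup facts for each table key
theorem pv_get_BT_night : pvTblBT.get? "night" = some pvV0 :=
  PySem.Dict.get?_of_mem_items pvTblBT (by simp [pvTblBT]) pv_nodup_BT
theorem pv_get_BT_0900_pm : pvTblBT.get? "09:00 pm" = some pvV0 :=
  PySem.Dict.get?_of_mem_items pvTblBT (by simp [pvTblBT]) pv_nodup_BT
theorem pv_get_BT_1000_pm : pvTblBT.get? "10:00 pm" = some pvV0 :=
  PySem.Dict.get?_of_mem_items pvTblBT (by simp [pvTblBT]) pv_nodup_BT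
theorem pv_get_BT_1100_pm : pvTblBT.get? "11:00 pm" = some pvV0 :=
  PySem.Dict.get?_of_mem_items pvTblBT (by simp [pvTblBT]) pv_nodup_BT
theorem pv_get_BT_morning : pvTblBT.get? "morning" = some pvV1 :=
  PySem.Dict.get?_of_mem_items pvTblBT (by simp [pvTblBT]) pv_nodup_BT
theorem pv_get_BT_0600_am : pvTblBT.get? "06:00 am" = some pvV1 :=
  PySem.Dict.get?_of_mem_items pvTblBT (by simp [pvTblBT]) pv_nodup_BT
theorem pv_get_BT_0700_am : pvTblBT.get? "07:00 am" = some pvV1 :=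
  PySem.Dict.get?_of_mem_items pvTblBT (by simp [pvTblBT]) pv_nodup_BT
theorem pv_get_BT_0800_am : pvTblBT.get? "08:00 am" = some pvV1 :=
  PySem.Dict.get?_of_mem_items pvTblBT (by simp [pvTblBT]) pv_nodup_BT
theorem pv_get_BT_sunset : pvTblBT.get? "sunset" = some pvV2 :=
  PySem.Dict.get?_of_mem_items pvTblBT (by simp [pvTblBT]) pv_nodup_BT
theorem pv_get_BT_0600_pm : pvTblBT.get? "06:00 pm" = some pvV4 :=
  PySem.Dict.get?_of_mem_items pvTblBT (by simp [pvTblBT]) pv_nodup_BT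
theorem pv_get_BT_0700_pm : pvTblBT.get? "07:00 pm" = some pvV4 :=
  PySem.Dict.get?_of_mem_items pvTblBT (by simp [pvTblBT]) pv_nodup_BT
theorem pv_get_BT_0800_pm : pvTblBT.get? "08:00 pm" = some pvV4 :=
  PySem.Dict.get?_of_mem_items pvTblBT (by simp [pvTblBT]) pv_nodup_BT
theorem pv_get_CAT_casino : pvTblCAT.get? "casino" = some pvV0 :=
  PySem.Dict.get?_of_mem_items pvTblCAT (by simp [pvTblCAT]) pv_nodup_CAT
theorem pv_get_CAT_nightlife : pvTblCAT.get? "nightlife" = some pvV0 :=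
  PySem.Dict.get?_of_mem_items pvTblCAT (by simp [pvTblCAT]) pv_nodup_CAT
theorem pv_get_CAT_trek : pvTblCAT.get? "trek" = some pvV1 :=
  PySem.Dict.get?_of_mem_items pvTblCAT (by simp [pvTblCAT]) pv_nodup_CAT
theorem pv_get_CAT_wildlife : pvTblCAT.get? "wildlife" = some pvV1 :=
  PySem.Dict.get?_of_mem_items pvTblCAT (by simp [pvTblCAT]) pv_nodup_CAT
theorem pv_get_CAT_nature : pvTblCAT.get? "nature" = some pvV1 :=
  PySem.Dict.get?_of_mem_items pvTblCAT (by simp [pvTblCAT]) pv_nodup_CAT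
theorem pv_get_CAT_beach : pvTblCAT.get? "beach" = some pvV2 :=
  PySem.Dict.get?_of_mem_items pvTblCAT (by simp [pvTblCAT]) pv_nodup_CAT
theorem pv_get_CAT_water_sports : pvTblCAT.get? "water sports" = some pvV3 :=
  PySem.Dict.get?_of_mem_items pvTblCAT (by simp [pvTblCAT]) pv_nodup_CAT
theorem pv_get_CAT_restaurant : pvTblCAT.get? "restaurant" = some pvV4 :=
  PySem.Dict.get?_of_mem_items pvTblCAT (by simp [pvTblCAT]) pv_nodup_CAT
theorem pv_get_CAT_dining : pvTblCAT.get? "dining" = some pvV4 :=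
  PySem.Dict.get?_of_mem_items pvTblCAT (by simp [pvTblCAT]) pv_nodup_CAT
theorem pv_get_NM_club : pvTblNM.get? "club" = some pvV0 :=
  PySem.Dict.get?_of_mem_items pvTblNM (by simp [pvTblNM]) pv_nodup_NM
theorem pv_get_NM_casino : pvTblNM.get? "casino" = some pvV0 :=
  PySem.Dict.get?_of_mem_items pvTblNM (by simp [pvTblNM]) pv_nodup_NM
theorem pv_get_NM_party : pvTblNM.get? "party" = some pvV0 :=
  PySem.Dict.get?_of_mem_items pvTblNM (by simp [pvTblNM]) pv_nodup_NM
theorem pv_get_NM_tito : pvTblNM.get? "tito" = some pvV0 :=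
  PySem.Dict.get?_of_mem_items pvTblNM (by simp [pvTblNM]) pv_nodup_NM
theorem pv_get_NM_lpk : pvTblNM.get? "lpk" = some pvV0 :=
  PySem.Dict.get?_of_mem_items pvTblNM (by simp [pvTblNM]) pv_nodup_NM
theorem pv_get_NM_trek : pvTblNM.get? "trek" = some pvV1 :=
  PySem.Dict.get?_of_mem_items pvTblNM (by simp [pvTblNM]) pv_nodup_NM
theorem pv_get_NM_wildlife : pvTblNM.get? "wildlife" = some pvV1 :=
  PySem.Dict.get?_of_mem_items pvTblNM (by simp [pvTblNM]) pv_nodup_NM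
theorem pv_get_NM_bird : pvTblNM.get? "bird" = some pvV1 :=
  PySem.Dict.get?_of_mem_items pvTblNM (by simp [pvTblNM]) pv_nodup_NM
theorem pv_get_NM_yoga : pvTblNM.get? "yoga" = some pvV1 :=
  PySem.Dict.get?_of_mem_items pvTblNM (by simp [pvTblNM]) pv_nodup_NM
theorem pv_get_NM_beach : pvTblNM.get? "beach" = some pvV2 :=
  PySem.Dict.get?_of_mem_items pvTblNM (by simp [pvTblNM]) pv_nodup_NM
theorem pv_get_NM_scuba : pvTblNM.get? "scuba" = some pvV3 :=
  PySem.Dict.get?_of_mem_items pvTblNM (by simp [pvTblNM]) pv_nodup_NM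
theorem pv_get_NM_parasailing : pvTblNM.get? "parasailing" = some pvV3 :=
  PySem.Dict.get?_of_mem_items pvTblNM (by simp [pvTblNM]) pv_nodup_NM
theorem pv_get_NM_kayaking : pvTblNM.get? "kayaking" = some pvV3 :=
  PySem.Dict.get?_of_mem_items pvTblNM (by simp [pvTblNM]) pv_nodup_NM
theorem pv_get_NM_jet_ski : pvTblNM.get? "jet ski" = some pvV3 :=
  PySem.Dict.get?_of_mem_items pvTblNM (by simp [pvTblNM]) pv_nodup_NM
theorem pv_get_NM_surfing : pvTblNM.get? "surfing" = some pvV3 :=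
  PySem.Dict.get?_of_mem_items pvTblNM (by simp [pvTblNM]) pv_nodup_NM
theorem pv_get_NM_restaurant : pvTblNM.get? "restaurant" = some pvV4 :=
  PySem.Dict.get?_of_mem_items pvTblNM (by simp [pvTblNM]) pv_nodup_NM
theorem pv_get_NM_dining : pvTblNM.get? "dining" = some pvV4 :=
  PySem.Dict.get?_of_mem_items pvTblNM (by simp [pvTblNM]) pv_nodup_NM
theorem pv_get_NM_cruise : pvTblNM.get? "cruise" = some pvV4 :=
  PySem.Dict.get?_of_mem_items pvTblNM (by simp [pvTblNM]) pv_nodup_NM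
theorem pv_get_NM_cultural_show : pvTblNM.get? "cultural show" = some pvV4 :=
  PySem.Dict.get?_of_mem_items pvTblNM (by simp [pvTblNM]) pv_nodup_NM

-- characterization of a match against each table
theorem pv_matched_BT (text : List Char) (v : Int × (Int × Int × Int)) :
    pvMatched pvTblBT text v ↔
      ((v = pvV0 ∧ pvB0 text) ∨
      (v = pvV1 ∧ pvB1 text) ∨
      (v = pvV2 ∧ pvB2 text) ∨
      (v = pvV4 ∧ pvB4 text)) := by
  constructor
  · rintro ⟨kw, hget, hin⟩
    have hm := PySem.Dict.mem_items_of_get?_eq_some pvTblBT hget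
    simp only [pvTblBT, List.mem_cons, List.not_mem_nil, or_false, Prod.mk.injEq] at hm
    rcases hm with ⟨rfl,rfl⟩|⟨rfl,rfl⟩|⟨rfl,rfl⟩|⟨rfl,rfl⟩|⟨rfl,rfl⟩|⟨rfl,rfl⟩|⟨rfl,rfl⟩|⟨rfl,rfl⟩|⟨rfl,rfl⟩|⟨rfl,rfl⟩|⟨rfl,rfl⟩|⟨rfl,rfl⟩
    · exact (Or.inl ⟨rfl, (Or.inl (pv_tl_night ▸ hin))⟩)
    · exact (Or.inl ⟨rfl, (Or.inr (Or.inl (pv_tl_0900_pm ▸ hin)))⟩)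
    · exact (Or.inl ⟨rfl, (Or.inr (Or.inr (Or.inl (pv_tl_1000_pm ▸ hin))))⟩)
    · exact (Or.inl ⟨rfl, (Or.inr (Or.inr (Or.inr (pv_tl_1100_pm ▸ hin))))⟩)
    · exact (Or.inr (Or.inl ⟨rfl, (Or.inl (pv_tl_morning ▸ hin))⟩))
    · exact (Or.inr (Or.inl ⟨rfl, (Or.inr (Or.inl (pv_tl_0600_am ▸ hin)))⟩))
    · exact (Or.inr (Or.inl ⟨rfl, (Or.inr (Or.inr (Or.inl (pv_tl_0700_am ▸ hin))))⟩))
    · exact (Or.inr (Or.inl ⟨rfl, (Or.inr (Or.inr (Or.inr (pv_tl_0800_am ▸ hin))))⟩))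
    · unfold pvB2; exact (Or.inr (Or.inr (Or.inl ⟨rfl, (pv_tl_sunset ▸ hin)⟩)))
    · exact (Or.inr (Or.inr (Or.inr ⟨rfl, (Or.inl (pv_tl_0600_pm ▸ hin))⟩)))
    · exact (Or.inr (Or.inr (Or.inr ⟨rfl, (Or.inr (Or.inl (pv_tl_0700_pm ▸ hin)))⟩)))
    · exact (Or.inr (Or.inr (Or.inr ⟨rfl, (Or.inr (Or.inr (pv_tl_0800_pm ▸ hin)))⟩)))
  · rintro (⟨rfl, h⟩ | ⟨rfl, h⟩ | ⟨rfl, h⟩ | ⟨rfl, h⟩)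
    · unfold pvB0 at h
      rcases h with h | h | h | h
      · exact ⟨"night", pv_get_BT_night, pv_tl_night.symm ▸ h⟩
      · exact ⟨"09:00 pm", pv_get_BT_0900_pm, pv_tl_0900_pm.symm ▸ h⟩
      · exact ⟨"10:00 pm", pv_get_BT_1000_pm, pv_tl_1000_pm.symm ▸ h⟩
      · exact ⟨"11:00 pm", pv_get_BT_1100_pm, pv_tl_1100_pm.symm ▸ h⟩
    · unfold pvB1 at h
      rcases h with h | h | h | h
      · exact ⟨"morning", pv_get_BT_morning, pv_tl_morning.symm ▸ h⟩
      · exact ⟨"06:00 am", pv_get_BT_0600_am, pv_tl_0600_am.symm ▸ h⟩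
      · exact ⟨"07:00 am", pv_get_BT_0700_am, pv_tl_0700_am.symm ▸ h⟩
      · exact ⟨"08:00 am", pv_get_BT_0800_am, pv_tl_0800_am.symm ▸ h⟩
    · unfold pvB2 at h
      exact ⟨"sunset", pv_get_BT_sunset, pv_tl_sunset.symm ▸ h⟩
    · unfold pvB4 at h
      rcases h with h | h | h
      · exact ⟨"06:00 pm", pv_get_BT_0600_pm, pv_tl_0600_pm.symm ▸ h⟩
      · exact ⟨"07:00 pm", pv_get_BT_0700_pm, pv_tl_0700_pm.symm ▸ h⟩
      · exact ⟨"08:00 pm", pv_get_BT_0800_pm, pv_tl_0800_pm.symm ▸ h⟩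

theorem pv_matched_CAT (text : List Char) (v : Int × (Int × Int × Int)) :
    pvMatched pvTblCAT text v ↔
      ((v = pvV0 ∧ pvC0 text) ∨
      (v = pvV1 ∧ pvC1 text) ∨
      (v = pvV2 ∧ pvC2 text) ∨
      (v = pvV3 ∧ pvC3 text) ∨
      (v = pvV4 ∧ pvC4 text)) := by
  constructor
  · rintro ⟨kw, hget, hin⟩
    have hm := PySem.Dict.mem_items_of_get?_eq_some pvTblCAT hget
    simp only [pvTblCAT, List.mem_cons, List.not_mem_nil, or_false, Prod.mk.injEq] at hm
    rcases hm with ⟨rfl,rfl⟩|⟨rfl,rfl⟩|⟨rfl,rfl⟩|⟨rfl,rfl⟩|⟨rfl,rfl⟩|⟨rfl,rfl⟩|⟨rfl,rfl⟩|⟨rfl,rfl⟩|⟨rfl,rfl⟩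
    · exact (Or.inl ⟨rfl, (Or.inl (pv_tl_casino ▸ hin))⟩)
    · exact (Or.inl ⟨rfl, (Or.inr (pv_tl_nightlife ▸ hin))⟩)
    · exact (Or.inr (Or.inl ⟨rfl, (Or.inl (pv_tl_trek ▸ hin))⟩))
    · exact (Or.inr (Or.inl ⟨rfl, (Or.inr (Or.inl (pv_tl_wildlife ▸ hin)))⟩))
    · exact (Or.inr (Or.inl ⟨rfl, (Or.inr (Or.inr (pv_tl_nature ▸ hin)))⟩))
    · unfold pvC2; exact (Or.inr (Or.inr (Or.inl ⟨rfl, (pv_tl_beach ▸ hin)⟩)))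
    · unfold pvC3; exact (Or.inr (Or.inr (Or.inr (Or.inl ⟨rfl, (pv_tl_water_sports ▸ hin)⟩))))
    · exact (Or.inr (Or.inr (Or.inr (Or.inr ⟨rfl, (Or.inl (pv_tl_restaurant ▸ hin))⟩))))
    · exact (Or.inr (Or.inr (Or.inr (Or.inr ⟨rfl, (Or.inr (pv_tl_dining ▸ hin))⟩))))
  · rintro (⟨rfl, h⟩ | ⟨rfl, h⟩ | ⟨rfl, h⟩ | ⟨rfl, h⟩ | ⟨rfl, h⟩)
    · unfold pvC0 at h
      rcases h with h | h
      · exact ⟨"casino", pv_get_CAT_casino, pv_tl_casino.symm ▸ h⟩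
      · exact ⟨"nightlife", pv_get_CAT_nightlife, pv_tl_nightlife.symm ▸ h⟩
    · unfold pvC1 at h
      rcases h with h | h | h
      · exact ⟨"trek", pv_get_CAT_trek, pv_tl_trek.symm ▸ h⟩
      · exact ⟨"wildlife", pv_get_CAT_wildlife, pv_tl_wildlife.symm ▸ h⟩
      · exact ⟨"nature", pv_get_CAT_nature, pv_tl_nature.symm ▸ h⟩
    · unfold pvC2 at h
      exact ⟨"beach", pv_get_CAT_beach, pv_tl_beach.symm ▸ h⟩
    · unfold pvC3 at h
      exact ⟨"water sports", pv_get_CAT_water_sports, pv_tl_water_sports.symm ▸ h⟩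
    · unfold pvC4 at h
      rcases h with h | h
      · exact ⟨"restaurant", pv_get_CAT_restaurant, pv_tl_restaurant.symm ▸ h⟩
      · exact ⟨"dining", pv_get_CAT_dining, pv_tl_dining.symm ▸ h⟩

theorem pv_matched_NM (text : List Char) (v : Int × (Int × Int × Int)) :
    pvMatched pvTblNM text v ↔
      ((v = pvV0 ∧ pvN0 text) ∨
      (v = pvV1 ∧ pvN1 text) ∨
      (v = pvV2 ∧ pvN2 text) ∨
      (v = pvV3 ∧ pvN3 text) ∨
      (v = pvV4 ∧ pvN4 text)) := by
  constructor
  · rintro ⟨kw, hget, hin⟩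
    have hm := PySem.Dict.mem_items_of_get?_eq_some pvTblNM hget
    simp only [pvTblNM, List.mem_cons, List.not_mem_nil, or_false, Prod.mk.injEq] at hm
    rcases hm with ⟨rfl,rfl⟩|⟨rfl,rfl⟩|⟨rfl,rfl⟩|⟨rfl,rfl⟩|⟨rfl,rfl⟩|⟨rfl,rfl⟩|⟨rfl,rfl⟩|⟨rfl,rfl⟩|⟨rfl,rfl⟩|⟨rfl,rfl⟩|⟨rfl,rfl⟩|⟨rfl,rfl⟩|⟨rfl,rfl⟩|⟨rfl,rfl⟩|⟨rfl,rfl⟩|⟨rfl,rfl⟩|⟨rfl,rfl⟩|⟨rfl,rfl⟩|⟨rfl,rfl⟩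
    · exact (Or.inl ⟨rfl, (Or.inl (pv_tl_club ▸ hin))⟩)
    · exact (Or.inl ⟨rfl, (Or.inr (Or.inl (pv_tl_casino ▸ hin)))⟩)
    · exact (Or.inl ⟨rfl, (Or.inr (Or.inr (Or.inl (pv_tl_party ▸ hin))))⟩)
    · exact (Or.inl ⟨rfl, (Or.inr (Or.inr (Or.inr (Or.inl (pv_tl_tito ▸ hin)))))⟩)
    · exact (Or.inl ⟨rfl, (Or.inr (Or.inr (Or.inr (Or.inr (pv_tl_lpk ▸ hin)))))⟩)
    · exact (Or.inr (Or.inl ⟨rfl, (Or.inl (pv_tl_trek ▸ hin))⟩))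
    · exact (Or.inr (Or.inl ⟨rfl, (Or.inr (Or.inl (pv_tl_wildlife ▸ hin)))⟩))
    · exact (Or.inr (Or.inl ⟨rfl, (Or.inr (Or.inr (Or.inl (pv_tl_bird ▸ hin))))⟩))
    · exact (Or.inr (Or.inl ⟨rfl, (Or.inr (Or.inr (Or.inr (pv_tl_yoga ▸ hin))))⟩))
    · unfold pvN2; exact (Or.inr (Or.inr (Or.inl ⟨rfl, (pv_tl_beach ▸ hin)⟩)))
    · exact (Or.inr (Or.inr (Or.inr (Or.inl ⟨rfl, (Or.inl (pv_tl_scuba ▸ hin))⟩))))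
    · exact (Or.inr (Or.inr (Or.inr (Or.inl ⟨rfl, (Or.inr (Or.inl (pv_tl_parasailing ▸ hin)))⟩))))
    · exact (Or.inr (Or.inr (Or.inr (Or.inl ⟨rfl, (Or.inr (Or.inr (Or.inl (pv_tl_kayaking ▸ hin))))⟩))))
    · exact (Or.inr (Or.inr (Or.inr (Or.inl ⟨rfl, (Or.inr (Or.inr (Or.inr (Or.inl (pv_tl_jet_ski ▸ hin)))))⟩))))
    · exact (Or.inr (Or.inr (Or.inr (Or.inl ⟨rfl, (Or.inr (Or.inr (Or.inr (Or.inr (pv_tl_surfing ▸ hin)))))⟩))))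
    · exact (Or.inr (Or.inr (Or.inr (Or.inr ⟨rfl, (Or.inl (pv_tl_restaurant ▸ hin))⟩))))
    · exact (Or.inr (Or.inr (Or.inr (Or.inr ⟨rfl, (Or.inr (Or.inl (pv_tl_dining ▸ hin)))⟩))))
    · exact (Or.inr (Or.inr (Or.inr (Or.inr ⟨rfl, (Or.inr (Or.inr (Or.inl (pv_tl_cruise ▸ hin))))⟩))))
    · exact (Or.inr (Or.inr (Or.inr (Or.inr ⟨rfl, (Or.inr (Or.inr (Or.inr (pv_tl_cultural_show ▸ hin))))⟩))))
  · rintro (⟨rfl, h⟩ | ⟨rfl, h⟩ | ⟨rfl, h⟩ | ⟨rfl, h⟩ | ⟨rfl, h⟩)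
    · unfold pvN0 at h
      rcases h with h | h | h | h | h
      · exact ⟨"club", pv_get_NM_club, pv_tl_club.symm ▸ h⟩
      · exact ⟨"casino", pv_get_NM_casino, pv_tl_casino.symm ▸ h⟩
      · exact ⟨"party", pv_get_NM_party, pv_tl_party.symm ▸ h⟩
      · exact ⟨"tito", pv_get_NM_tito, pv_tl_tito.symm ▸ h⟩
      · exact ⟨"lpk", pv_get_NM_lpk, pv_tl_lpk.symm ▸ h⟩
    · unfold pvN1 at h
      rcases h with h | h | h | h
      · exact ⟨"trek", pv_get_NM_trek, pv_tl_trek.symm ▸ h⟩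
      · exact ⟨"wildlife", pv_get_NM_wildlife, pv_tl_wildlife.symm ▸ h⟩
      · exact ⟨"bird", pv_get_NM_bird, pv_tl_bird.symm ▸ h⟩
      · exact ⟨"yoga", pv_get_NM_yoga, pv_tl_yoga.symm ▸ h⟩
    · unfold pvN2 at h
      exact ⟨"beach", pv_get_NM_beach, pv_tl_beach.symm ▸ h⟩
    · unfold pvN3 at h
      rcases h with h | h | h | h | h
      · exact ⟨"scuba", pv_get_NM_scuba, pv_tl_scuba.symm ▸ h⟩
      · exact ⟨"parasailing", pv_get_NM_parasailing, pv_tl_parasailing.symm ▸ h⟩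
      · exact ⟨"kayaking", pv_get_NM_kayaking, pv_tl_kayaking.symm ▸ h⟩
      · exact ⟨"jet ski", pv_get_NM_jet_ski, pv_tl_jet_ski.symm ▸ h⟩
      · exact ⟨"surfing", pv_get_NM_surfing, pv_tl_surfing.symm ▸ h⟩
    · unfold pvN4 at h
      rcases h with h | h | h | h
      · exact ⟨"restaurant", pv_get_NM_restaurant, pv_tl_restaurant.symm ▸ h⟩
      · exact ⟨"dining", pv_get_NM_dining, pv_tl_dining.symm ▸ h⟩
      · exact ⟨"cruise", pv_get_NM_cruise, pv_tl_cruise.symm ▸ h⟩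
      · exact ⟨"cultural show", pv_get_NM_cultural_show, pv_tl_cultural_show.symm ▸ h⟩

-- the three chained scans: bounds and the "default or matched" disjunction
theorem pv_chain_le_nm (bt cat nm : List Char) (b0 v : Int × (Int × Int × Int))
    (h : pvMatched pvTblNM nm v) :
    (pvScanText pvTblNM nm (pvScanText pvTblCAT cat (pvScanText pvTblBT bt b0))).1 ≤ v.1 :=
  pv_scan_le_of_matched pvTblNM nm pv_keys_NM h _

theorem pv_chain_le_cat (bt cat nm : List Char) (b0 v : Int × (Int × Int × Int))
    (h : pvMatched pvTblCAT cat v) :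
    (pvScanText pvTblNM nm (pvScanText pvTblCAT cat (pvScanText pvTblBT bt b0))).1 ≤ v.1 :=
  le_trans (pv_scan_fst_le pvTblNM nm _) (pv_scan_le_of_matched pvTblCAT cat pv_keys_CAT h _)

theorem pv_chain_le_bt (bt cat nm : List Char) (b0 v : Int × (Int × Int × Int))
    (h : pvMatched pvTblBT bt v) :
    (pvScanText pvTblNM nm (pvScanText pvTblCAT cat (pvScanText pvTblBT bt b0))).1 ≤ v.1 :=
  le_trans (pv_scan_fst_le pvTblNM nm _)
    (le_trans (pv_scan_fst_le pvTblCAT cat _) (pv_scan_le_of_matched pvTblBT bt pv_keys_BT h _))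

theorem pv_chain_cases (bt cat nm : List Char) (b0 : Int × (Int × Int × Int)) :
    pvScanText pvTblNM nm (pvScanText pvTblCAT cat (pvScanText pvTblBT bt b0)) = b0 ∨
    pvMatched pvTblBT bt (pvScanText pvTblNM nm (pvScanText pvTblCAT cat (pvScanText pvTblBT bt b0))) ∨
    pvMatched pvTblCAT cat (pvScanText pvTblNM nm (pvScanText pvTblCAT cat (pvScanText pvTblBT bt b0))) ∨
    pvMatched pvTblNM nm (pvScanText pvTblNM nm (pvScanText pvTblCAT cat (pvScanText pvTblBT bt b0))) := by
  rcases pv_scan_eq_or pvTblNM nm (pvScanText pvTblCAT cat (pvScanText pvTblBT bt b0)) with h3 | h3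
  · rw [h3]
    rcases pv_scan_eq_or pvTblCAT cat (pvScanText pvTblBT bt b0) with h2 | h2
    · rw [h2]
      rcases pv_scan_eq_or pvTblBT bt b0 with h1 | h1
      · rw [h1]; exact Or.inl rfl
      · exact Or.inr (Or.inl h1)
    · exact Or.inr (Or.inr (Or.inl h2))
  · exact Or.inr (Or.inr (Or.inr h3))

-- lower is idempotent (A lowercases name twice in its evening branch)
theorem pv_lowerChar_idem (c : Char) : PySem.Chars.lowerChar (PySem.Chars.lowerChar c) = PySem.Chars.lowerChar c := by
  simp only [PySem.Chars.lowerChar, PySem.Chars.isupper]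
  split_ifs with h1 h2
  · exfalso
    simp only [Bool.and_eq_true, decide_eq_true_eq] at h1 h2
    have h65 : 65 ≤ c.toNat := by
      have h := h1.1; rw [Char.le_def, UInt32.le_iff_toNat_le] at h; simpa using h
    have h90 : c.toNat ≤ 90 := by
      have h := h1.2; rw [Char.le_def, UInt32.le_iff_toNat_le] at h; simpa using h
    have hv : (c.toNat + 32).isValidChar := Or.inl (by omega)
    have heq : (Char.ofNat (c.toNat + 32)).toNat = c.toNat + 32 := by
      rw [Char.toNat_ofNat, if_pos hv]
    have h := h2.2
    rw [Char.le_def, UInt32.le_iff_toNat_le] at h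
    have hz : ('Z'.val.toNat) = 90 := by decide
    have heq' : (Char.ofNat (c.toNat + 32)).val.toNat = c.toNat + 32 := heq
    omega
  · rfl
  · rfl

theorem pv_chars_lower_idem (l : List Char) :
    PySem.Chars.lower (PySem.Chars.lower l) = PySem.Chars.lower l := by
  simp [PySem.Chars.lower, List.map_map, Function.comp_def, pv_lowerChar_idem]

-- pure reassociations of A's Bool conditions into the per-table grouping (no reordering)
theorem pv_shuffle0 (c1 c2 n1 n2 n3 n4 n5 b1 b2 b3 b4 : Bool) :
    (c1 || c2 || (n1 || (n2 || (n3 || (n4 || n5)))) || b1 || (b2 || b3 || b4)) =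
    ((c1 || c2) || ((n1 || (n2 || (n3 || (n4 || n5)))) || (b1 || (b2 || (b3 || b4))))) := by
  simp [Bool.or_assoc]

theorem pv_shuffle1 (c1 c2 c3 b1 b2 b3 b4 n1 n2 n3 n4 : Bool) :
    (c1 || (c2 || c3) || b1 || (b2 || b3 || b4) || (n1 || (n2 || (n3 || n4)))) =
    ((c1 || (c2 || c3)) || ((b1 || (b2 || (b3 || b4))) || (n1 || (n2 || (n3 || n4))))) := by
  simp [Bool.or_assoc]

theorem pv_shuffle2 (c1 n1 b1 : Bool) : (c1 || n1 || b1) = (c1 || (n1 || b1)) := by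
  simp [Bool.or_assoc]

theorem pv_shuffle4 (c1 c2 n1 n2 n3 n4 b1 b2 b3 : Bool) :
    (c1 || c2 || (n1 || (n2 || (n3 || n4))) || (b1 || b2 || b3)) =
    ((c1 || c2) || ((n1 || (n2 || (n3 || n4))) || (b1 || (b2 || b3)))) := by
  simp [Bool.or_assoc]

-- main equivalence
set_option maxHeartbeats 1000000 in
theorem get_time_slot_priority_eq (place : List (String × String)) :
    get_time_slot_priority place = get_time_slot_priority_alt place := by
  simp only [get_time_slot_priority, get_time_slot_priority_alt, pvTables,
    List.foldl_cons, List.foldl_nil, List.any_cons, List.any_nil, Bool.or_false,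
    PySem.Str.isIn_eq, PySem.Str.toList_lower, pv_chars_lower_idem,
    pv_tl_0600_am, pv_tl_0600_pm, pv_tl_0700_am, pv_tl_0700_pm, pv_tl_0800_am, pv_tl_0800_pm, pv_tl_0900_pm, pv_tl_1000_pm, pv_tl_1100_pm, pv_tl_beach, pv_tl_bird, pv_tl_casino, pv_tl_club, pv_tl_cruise, pv_tl_cultural_show, pv_tl_dining, pv_tl_jet_ski, pv_tl_kayaking, pv_tl_lpk, pv_tl_morning, pv_tl_nature, pv_tl_night, pv_tl_nightlife, pv_tl_parasailing, pv_tl_party, pv_tl_restaurant, pv_tl_scuba, pv_tl_sunset, pv_tl_surfing, pv_tl_tito, pv_tl_trek, pv_tl_water_sports, pv_tl_wildlife, pv_tl_yoga]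
  set bt := PySem.Chars.lower (pvGet place "best_time").toList with hbt
  set cat := PySem.Chars.lower (pvGet place "category").toList with hcat
  set nm := PySem.Chars.lower (pvGet place "name").toList with hnm
  set F := pvScanText pvTblNM nm (pvScanText pvTblCAT cat (pvScanText pvTblBT bt pvDef)) with hFdef
  have hchain := pv_chain_cases bt cat nm pvDef
  rw [← hFdef] at hchain
  split_ifs with hc0 hc1 hc2 hc3 hc4
  · -- night
    have hp : pvP0 bt cat nm := by
      rw [pv_shuffle0] at hc0; simp only [Bool.or_eq_true] at hc0; exact hc0
    have hle : F.1 ≤ pvV0.1 := by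
      rcases hp with h | h | h
      · exact pv_chain_le_cat bt cat nm pvDef pvV0 ((pv_matched_CAT cat pvV0).mpr (Or.inl ⟨rfl, h⟩))
      · exact pv_chain_le_nm bt cat nm pvDef pvV0 ((pv_matched_NM nm pvV0).mpr (Or.inl ⟨rfl, h⟩))
      · exact pv_chain_le_bt bt cat nm pvDef pvV0 ((pv_matched_BT bt pvV0).mpr (Or.inl ⟨rfl, h⟩))
    have hFv : F = pvV0 := by
      rcases hchain with hEq | hm | hm | hm
      · exfalso; rw [hEq] at hle; norm_num [pvDef, pvV0] at hle
      · rcases (pv_matched_BT bt F).mp hm with ⟨hEq, hg⟩ | ⟨hEq, hg⟩ | ⟨hEq, hg⟩ | ⟨hEq, hg⟩ <;>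
          first
          | exact hEq
          | (exfalso; rw [hEq] at hle; norm_num [pvV0, pvV1, pvV2, pvV3, pvV4] at hle; done)
      · rcases (pv_matched_CAT cat F).mp hm with ⟨hEq, hg⟩ | ⟨hEq, hg⟩ | ⟨hEq, hg⟩ | ⟨hEq, hg⟩ | ⟨hEq, hg⟩ <;>
          first
          | exact hEq
          | (exfalso; rw [hEq] at hle; norm_num [pvV0, pvV1, pvV2, pvV3, pvV4] at hle; done)
      · rcases (pv_matched_NM nm F).mp hm with ⟨hEq, hg⟩ | ⟨hEq, hg⟩ | ⟨hEq, hg⟩ | ⟨hEq, hg⟩ | ⟨hEq, hg⟩ <;>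
          first
          | exact hEq
          | (exfalso; rw [hEq] at hle; norm_num [pvV0, pvV1, pvV2, pvV3, pvV4] at hle; done)
    rw [hFv]; norm_num [pvV0]
  · -- morning
    have hn0 : ¬ pvP0 bt cat nm := by
      rw [pv_shuffle0] at hc0; simp only [Bool.or_eq_true] at hc0; exact hc0
    have hp : pvP1 bt cat nm := by
      rw [pv_shuffle1] at hc1; simp only [Bool.or_eq_true] at hc1; exact hc1
    have hle : F.1 ≤ pvV1.1 := by
      rcases hp with h | h | h
      · exact pv_chain_le_cat bt cat nm pvDef pvV1 ((pv_matched_CAT cat pvV1).mpr (Or.inr (Or.inl ⟨rfl, h⟩)))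
      · exact pv_chain_le_bt bt cat nm pvDef pvV1 ((pv_matched_BT bt pvV1).mpr (Or.inr (Or.inl ⟨rfl, h⟩)))
      · exact pv_chain_le_nm bt cat nm pvDef pvV1 ((pv_matched_NM nm pvV1).mpr (Or.inr (Or.inl ⟨rfl, h⟩)))
    have hFv : F = pvV1 := by
      rcases hchain with hEq | hm | hm | hm
      · exfalso; rw [hEq] at hle; norm_num [pvDef, pvV1] at hle
      · rcases (pv_matched_BT bt F).mp hm with ⟨hEq, hg⟩ | ⟨hEq, hg⟩ | ⟨hEq, hg⟩ | ⟨hEq, hg⟩ <;>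
          first
          | exact hEq
          | (exfalso; rw [hEq] at hle; norm_num [pvV0, pvV1, pvV2, pvV3, pvV4] at hle; done)
          | (exfalso; exact hn0 (Or.inl hg))
          | (exfalso; exact hn0 (Or.inr (Or.inl hg)))
          | (exfalso; exact hn0 (Or.inr (Or.inr hg)))
      · rcases (pv_matched_CAT cat F).mp hm with ⟨hEq, hg⟩ | ⟨hEq, hg⟩ | ⟨hEq, hg⟩ | ⟨hEq, hg⟩ | ⟨hEq, hg⟩ <;>
          first
          | exact hEq
          | (exfalso; rw [hEq] at hle; norm_num [pvV0, pvV1, pvV2, pvV3, pvV4] at hle; done)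
          | (exfalso; exact hn0 (Or.inl hg))
          | (exfalso; exact hn0 (Or.inr (Or.inl hg)))
          | (exfalso; exact hn0 (Or.inr (Or.inr hg)))
      · rcases (pv_matched_NM nm F).mp hm with ⟨hEq, hg⟩ | ⟨hEq, hg⟩ | ⟨hEq, hg⟩ | ⟨hEq, hg⟩ | ⟨hEq, hg⟩ <;>
          first
          | exact hEq
          | (exfalso; rw [hEq] at hle; norm_num [pvV0, pvV1, pvV2, pvV3, pvV4] at hle; done)
          | (exfalso; exact hn0 (Or.inl hg))
          | (exfalso; exact hn0 (Or.inr (Or.inl hg)))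
          | (exfalso; exact hn0 (Or.inr (Or.inr hg)))
    rw [hFv]; norm_num [pvV1]
  · -- beach / sunset
    have hn0 : ¬ pvP0 bt cat nm := by
      rw [pv_shuffle0] at hc0; simp only [Bool.or_eq_true] at hc0; exact hc0
    have hn1 : ¬ pvP1 bt cat nm := by
      rw [pv_shuffle1] at hc1; simp only [Bool.or_eq_true] at hc1; exact hc1
    have hp : pvP2 bt cat nm := by
      rw [pv_shuffle2] at hc2; simp only [Bool.or_eq_true] at hc2; exact hc2
    have hle : F.1 ≤ pvV2.1 := by
      rcases hp with h | h | h
      · exact pv_chain_le_cat bt cat nm pvDef pvV2 ((pv_matched_CAT cat pvV2).mpr (Or.inr (Or.inr (Or.inl ⟨rfl, h⟩))))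
      · exact pv_chain_le_nm bt cat nm pvDef pvV2 ((pv_matched_NM nm pvV2).mpr (Or.inr (Or.inr (Or.inl ⟨rfl, h⟩))))
      · exact pv_chain_le_bt bt cat nm pvDef pvV2 ((pv_matched_BT bt pvV2).mpr (Or.inr (Or.inr (Or.inl ⟨rfl, h⟩))))
    have hFv : F = pvV2 := by
      rcases hchain with hEq | hm | hm | hm
      · exfalso; rw [hEq] at hle; norm_num [pvDef, pvV2] at hle
      · rcases (pv_matched_BT bt F).mp hm with ⟨hEq, hg⟩ | ⟨hEq, hg⟩ | ⟨hEq, hg⟩ | ⟨hEq, hg⟩ <;>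
          first
          | exact hEq
          | (exfalso; rw [hEq] at hle; norm_num [pvV0, pvV1, pvV2, pvV3, pvV4] at hle; done)
          | (exfalso; exact hn0 (Or.inl hg))
          | (exfalso; exact hn0 (Or.inr (Or.inl hg)))
          | (exfalso; exact hn0 (Or.inr (Or.inr hg)))
          | (exfalso; exact hn1 (Or.inl hg))
          | (exfalso; exact hn1 (Or.inr (Or.inl hg)))
          | (exfalso; exact hn1 (Or.inr (Or.inr hg)))
      · rcases (pv_matched_CAT cat F).mp hm with ⟨hEq, hg⟩ | ⟨hEq, hg⟩ | ⟨hEq, hg⟩ | ⟨hEq, hg⟩ | ⟨hEq, hg⟩ <;>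
          first
          | exact hEq
          | (exfalso; rw [hEq] at hle; norm_num [pvV0, pvV1, pvV2, pvV3, pvV4] at hle; done)
          | (exfalso; exact hn0 (Or.inl hg))
          | (exfalso; exact hn0 (Or.inr (Or.inl hg)))
          | (exfalso; exact hn0 (Or.inr (Or.inr hg)))
          | (exfalso; exact hn1 (Or.inl hg))
          | (exfalso; exact hn1 (Or.inr (Or.inl hg)))
          | (exfalso; exact hn1 (Or.inr (Or.inr hg)))
      · rcases (pv_matched_NM nm F).mp hm with ⟨hEq, hg⟩ | ⟨hEq, hg⟩ | ⟨hEq, hg⟩ | ⟨hEq, hg⟩ | ⟨hEq, hg⟩ <;>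
          first
          | exact hEq
          | (exfalso; rw [hEq] at hle; norm_num [pvV0, pvV1, pvV2, pvV3, pvV4] at hle; done)
          | (exfalso; exact hn0 (Or.inl hg))
          | (exfalso; exact hn0 (Or.inr (Or.inl hg)))
          | (exfalso; exact hn0 (Or.inr (Or.inr hg)))
          | (exfalso; exact hn1 (Or.inl hg))
          | (exfalso; exact hn1 (Or.inr (Or.inl hg)))
          | (exfalso; exact hn1 (Or.inr (Or.inr hg)))
    rw [hFv]; norm_num [pvV2]
  · -- water sports
    have hn0 : ¬ pvP0 bt cat nm := by
      rw [pv_shuffle0] at hc0; simp only [Bool.or_eq_true] at hc0; exact hc0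
    have hn1 : ¬ pvP1 bt cat nm := by
      rw [pv_shuffle1] at hc1; simp only [Bool.or_eq_true] at hc1; exact hc1
    have hn2 : ¬ pvP2 bt cat nm := by
      rw [pv_shuffle2] at hc2; simp only [Bool.or_eq_true] at hc2; exact hc2
    have hp : pvP3 bt cat nm := by
      simp only [Bool.or_eq_true] at hc3; exact hc3
    have hle : F.1 ≤ pvV3.1 := by
      rcases hp with h | h
      · exact pv_chain_le_cat bt cat nm pvDef pvV3 ((pv_matched_CAT cat pvV3).mpr (Or.inr (Or.inr (Or.inr (Or.inl ⟨rfl, h⟩)))))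
      · exact pv_chain_le_nm bt cat nm pvDef pvV3 ((pv_matched_NM nm pvV3).mpr (Or.inr (Or.inr (Or.inr (Or.inl ⟨rfl, h⟩)))))
    have hFv : F = pvV3 := by
      rcases hchain with hEq | hm | hm | hm
      · exfalso; rw [hEq] at hle; norm_num [pvDef, pvV3] at hle
      · rcases (pv_matched_BT bt F).mp hm with ⟨hEq, hg⟩ | ⟨hEq, hg⟩ | ⟨hEq, hg⟩ | ⟨hEq, hg⟩ <;>
          first
          | exact hEq
          | (exfalso; rw [hEq] at hle; norm_num [pvV0, pvV1, pvV2, pvV3, pvV4] at hle; done)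
          | (exfalso; exact hn0 (Or.inl hg))
          | (exfalso; exact hn0 (Or.inr (Or.inl hg)))
          | (exfalso; exact hn0 (Or.inr (Or.inr hg)))
          | (exfalso; exact hn1 (Or.inl hg))
          | (exfalso; exact hn1 (Or.inr (Or.inl hg)))
          | (exfalso; exact hn1 (Or.inr (Or.inr hg)))
          | (exfalso; exact hn2 (Or.inl hg))
          | (exfalso; exact hn2 (Or.inr (Or.inl hg)))
          | (exfalso; exact hn2 (Or.inr (Or.inr hg)))
      · rcases (pv_matched_CAT cat F).mp hm with ⟨hEq, hg⟩ | ⟨hEq, hg⟩ | ⟨hEq, hg⟩ | ⟨hEq, hg⟩ | ⟨hEq, hg⟩ <;>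
          first
          | exact hEq
          | (exfalso; rw [hEq] at hle; norm_num [pvV0, pvV1, pvV2, pvV3, pvV4] at hle; done)
          | (exfalso; exact hn0 (Or.inl hg))
          | (exfalso; exact hn0 (Or.inr (Or.inl hg)))
          | (exfalso; exact hn0 (Or.inr (Or.inr hg)))
          | (exfalso; exact hn1 (Or.inl hg))
          | (exfalso; exact hn1 (Or.inr (Or.inl hg)))
          | (exfalso; exact hn1 (Or.inr (Or.inr hg)))
          | (exfalso; exact hn2 (Or.inl hg))
          | (exfalso; exact hn2 (Or.inr (Or.inl hg)))
          | (exfalso; exact hn2 (Or.inr (Or.inr hg)))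
      · rcases (pv_matched_NM nm F).mp hm with ⟨hEq, hg⟩ | ⟨hEq, hg⟩ | ⟨hEq, hg⟩ | ⟨hEq, hg⟩ | ⟨hEq, hg⟩ <;>
          first
          | exact hEq
          | (exfalso; rw [hEq] at hle; norm_num [pvV0, pvV1, pvV2, pvV3, pvV4] at hle; done)
          | (exfalso; exact hn0 (Or.inl hg))
          | (exfalso; exact hn0 (Or.inr (Or.inl hg)))
          | (exfalso; exact hn0 (Or.inr (Or.inr hg)))
          | (exfalso; exact hn1 (Or.inl hg))
          | (exfalso; exact hn1 (Or.inr (Or.inl hg)))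
          | (exfalso; exact hn1 (Or.inr (Or.inr hg)))
          | (exfalso; exact hn2 (Or.inl hg))
          | (exfalso; exact hn2 (Or.inr (Or.inl hg)))
          | (exfalso; exact hn2 (Or.inr (Or.inr hg)))
    rw [hFv]; norm_num [pvV3]
  · -- evening
    have hn0 : ¬ pvP0 bt cat nm := by
      rw [pv_shuffle0] at hc0; simp only [Bool.or_eq_true] at hc0; exact hc0
    have hn1 : ¬ pvP1 bt cat nm := by
      rw [pv_shuffle1] at hc1; simp only [Bool.or_eq_true] at hc1; exact hc1
    have hn2 : ¬ pvP2 bt cat nm := by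
      rw [pv_shuffle2] at hc2; simp only [Bool.or_eq_true] at hc2; exact hc2
    have hn3 : ¬ pvP3 bt cat nm := by
      simp only [Bool.or_eq_true] at hc3; exact hc3
    have hp : pvP4 bt cat nm := by
      rw [pv_shuffle4] at hc4; simp only [Bool.or_eq_true] at hc4; exact hc4
    have hle : F.1 ≤ pvV4.1 := by
      rcases hp with h | h | h
      · exact pv_chain_le_cat bt cat nm pvDef pvV4 ((pv_matched_CAT cat pvV4).mpr (Or.inr (Or.inr (Or.inr (Or.inr ⟨rfl, h⟩)))))
      · exact pv_chain_le_nm bt cat nm pvDef pvV4 ((pv_matched_NM nm pvV4).mpr (Or.inr (Or.inr (Or.inr (Or.inr ⟨rfl, h⟩)))))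
      · exact pv_chain_le_bt bt cat nm pvDef pvV4 ((pv_matched_BT bt pvV4).mpr (Or.inr (Or.inr (Or.inr ⟨rfl, h⟩))))
    have hFv : F = pvV4 := by
      rcases hchain with hEq | hm | hm | hm
      · exfalso; rw [hEq] at hle; norm_num [pvDef, pvV4] at hle
      · rcases (pv_matched_BT bt F).mp hm with ⟨hEq, hg⟩ | ⟨hEq, hg⟩ | ⟨hEq, hg⟩ | ⟨hEq, hg⟩ <;>
          first
          | exact hEq
          | (exfalso; exact hn0 (Or.inl hg))
          | (exfalso; exact hn0 (Or.inr (Or.inl hg)))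
          | (exfalso; exact hn0 (Or.inr (Or.inr hg)))
          | (exfalso; exact hn1 (Or.inl hg))
          | (exfalso; exact hn1 (Or.inr (Or.inl hg)))
          | (exfalso; exact hn1 (Or.inr (Or.inr hg)))
          | (exfalso; exact hn2 (Or.inl hg))
          | (exfalso; exact hn2 (Or.inr (Or.inl hg)))
          | (exfalso; exact hn2 (Or.inr (Or.inr hg)))
          | (exfalso; exact hn3 (Or.inl hg))
          | (exfalso; exact hn3 (Or.inr hg))
      · rcases (pv_matched_CAT cat F).mp hm with ⟨hEq, hg⟩ | ⟨hEq, hg⟩ | ⟨hEq, hg⟩ | ⟨hEq, hg⟩ | ⟨hEq, hg⟩ <;>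
          first
          | exact hEq
          | (exfalso; exact hn0 (Or.inl hg))
          | (exfalso; exact hn0 (Or.inr (Or.inl hg)))
          | (exfalso; exact hn0 (Or.inr (Or.inr hg)))
          | (exfalso; exact hn1 (Or.inl hg))
          | (exfalso; exact hn1 (Or.inr (Or.inl hg)))
          | (exfalso; exact hn1 (Or.inr (Or.inr hg)))
          | (exfalso; exact hn2 (Or.inl hg))
          | (exfalso; exact hn2 (Or.inr (Or.inl hg)))
          | (exfalso; exact hn2 (Or.inr (Or.inr hg)))
          | (exfalso; exact hn3 (Or.inl hg))
          | (exfalso; exact hn3 (Or.inr hg))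
      · rcases (pv_matched_NM nm F).mp hm with ⟨hEq, hg⟩ | ⟨hEq, hg⟩ | ⟨hEq, hg⟩ | ⟨hEq, hg⟩ | ⟨hEq, hg⟩ <;>
          first
          | exact hEq
          | (exfalso; exact hn0 (Or.inl hg))
          | (exfalso; exact hn0 (Or.inr (Or.inl hg)))
          | (exfalso; exact hn0 (Or.inr (Or.inr hg)))
          | (exfalso; exact hn1 (Or.inl hg))
          | (exfalso; exact hn1 (Or.inr (Or.inl hg)))
          | (exfalso; exact hn1 (Or.inr (Or.inr hg)))
          | (exfalso; exact hn2 (Or.inl hg))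
          | (exfalso; exact hn2 (Or.inr (Or.inl hg)))
          | (exfalso; exact hn2 (Or.inr (Or.inr hg)))
          | (exfalso; exact hn3 (Or.inl hg))
          | (exfalso; exact hn3 (Or.inr hg))
    rw [hFv]; norm_num [pvV4]
  · -- default
    have hn0 : ¬ pvP0 bt cat nm := by
      rw [pv_shuffle0] at hc0; simp only [Bool.or_eq_true] at hc0; exact hc0
    have hn1 : ¬ pvP1 bt cat nm := by
      rw [pv_shuffle1] at hc1; simp only [Bool.or_eq_true] at hc1; exact hc1
    have hn2 : ¬ pvP2 bt cat nm := by
      rw [pv_shuffle2] at hc2; simp only [Bool.or_eq_true] at hc2; exact hc2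
    have hn3 : ¬ pvP3 bt cat nm := by
      simp only [Bool.or_eq_true] at hc3; exact hc3
    have hn4 : ¬ pvP4 bt cat nm := by
      rw [pv_shuffle4] at hc4; simp only [Bool.or_eq_true] at hc4; exact hc4
    have hFv : F = pvDef := by
      rcases hchain with hEq | hm | hm | hm
      · exact hEq
      · rcases (pv_matched_BT bt F).mp hm with ⟨hEq, hg⟩ | ⟨hEq, hg⟩ | ⟨hEq, hg⟩ | ⟨hEq, hg⟩
        · exact absurd (Or.inr (Or.inr hg)) hn0
        · exact absurd (Or.inr (Or.inl hg)) hn1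
        · exact absurd (Or.inr (Or.inr hg)) hn2
        · exact absurd (Or.inr (Or.inr hg)) hn4
      · rcases (pv_matched_CAT cat F).mp hm with ⟨hEq, hg⟩ | ⟨hEq, hg⟩ | ⟨hEq, hg⟩ | ⟨hEq, hg⟩ | ⟨hEq, hg⟩
        · exact absurd (Or.inl hg) hn0
        · exact absurd (Or.inl hg) hn1
        · exact absurd (Or.inl hg) hn2
        · exact absurd (Or.inl hg) hn3
        · exact absurd (Or.inl hg) hn4
      · rcases (pv_matched_NM nm F).mp hm with ⟨hEq, hg⟩ | ⟨hEq, hg⟩ | ⟨hEq, hg⟩ | ⟨hEq, hg⟩ | ⟨hEq, hg⟩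
        · exact absurd (Or.inr (Or.inl hg)) hn0
        · exact absurd (Or.inr (Or.inr hg)) hn1
        · exact absurd (Or.inr (Or.inl hg)) hn2
        · exact absurd (Or.inr hg) hn3
        · exact absurd (Or.inr (Or.inl hg)) hn4
    rw [hFv]; norm_num [pvDef]

-- ===== VERDICT (by name: the statement is the Claim_ definition above) =====
theorem get_time_slot_priority_spec : Claim_equal_get_time_slot_priority := by
  intro place _
  exact get_time_slot_priority_eq place
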